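-- pv_equiv track=rewrite | github.com/Chihvane/NAsales_quantplan | quant_framework/cleaners.py | _merge_product_catalog_rows
-- ===== SOURCE A (Python) =====
-- def _merge_product_catalog_rows(rows: list[dict[str, str]]) -> list[dict[str, str]]:
--     merged: dict[str, dict[str, str]] = {}
--     for row in rows:
--         canonical_sku = row["canonical_sku"]
--         current = merged.get(canonical_sku)
--         if current is None:
--             merged[canonical_sku] = dict(row)
--             continue
--         for key, value in row.items():
--             if value and not current.get(key):
--                 current[key] = value
--     return list(merged.values())
-- ===== SOURCE B (Python) =====
-- def _merge_product_catalog_rows(rows: list[dict[str, str]]) -> list[dict[str, str]]: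
--     groups: dict[str, list[dict[str, str]]] = {}
--     for row in rows:
--         groups.setdefault(row["canonical_sku"], []).append(row)
--     result: list[dict[str, str]] = []
--     for group in groups.values():
--         current = dict(group[0])
--         for row in group[1:]:
--             for key, value in row.items():
--                 if value and not current.get(key):
--                     current[key] = value
--         result.append(current)
--     return result
-- ===== Notes on version B (the rewrite author's own statement) =====
-- stated objective: alternative
-- what changed: Replaces A's fused lookup-and-merge single pass with two differently-shaped passes: first build an ordered dict grouping rows by canonical_sku, then reduce each group to one record with the fill rule.
import Mathlib
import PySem

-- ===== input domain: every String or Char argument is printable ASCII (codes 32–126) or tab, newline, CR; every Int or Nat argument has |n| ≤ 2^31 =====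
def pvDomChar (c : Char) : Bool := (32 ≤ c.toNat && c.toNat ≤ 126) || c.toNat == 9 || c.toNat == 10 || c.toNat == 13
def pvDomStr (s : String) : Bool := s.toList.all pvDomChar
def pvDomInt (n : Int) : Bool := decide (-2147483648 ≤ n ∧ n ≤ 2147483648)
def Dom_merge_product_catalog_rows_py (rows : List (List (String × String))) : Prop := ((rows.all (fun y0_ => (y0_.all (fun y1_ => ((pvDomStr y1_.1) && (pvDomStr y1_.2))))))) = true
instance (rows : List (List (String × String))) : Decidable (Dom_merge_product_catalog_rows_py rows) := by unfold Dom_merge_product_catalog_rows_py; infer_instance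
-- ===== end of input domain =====

-- B groups the rows by canonical_sku in one pass and then reduces each group with the same fill rule; equal to A's fused single pass.

-- ===== PORT A =====
-- each row (given as an association list) is the Python dict the function receives: Dict.ofList
def merge_product_catalog_rows_py (rows : List (List (String × String))) : List (List (String × String)) :=
  let merged := rows.foldl (fun merged row =>
    let rowd := PySem.Dict.ofList row
    let canonical_sku := rowd.getD "canonical_sku" ""   -- row["canonical_sku"]; Pre_ guarantees the key is present
    match merged.get? canonical_sku with
    | none => merged.insert canonical_sku rowd
    | some current =>
        merged.insert canonical_sku (rowd.items.foldl (fun current kv =>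
          if kv.2 != "" && current.getD kv.1 "" == "" then current.insert kv.1 kv.2 else current) current)
    ) PySem.Dict.empty
  merged.values.map (fun d => d.items)

-- ===== PORT B =====
def merge_product_catalog_rows_py_alt (rows : List (List (String × String))) : List (List (String × String)) :=
  let groups := rows.foldl (fun groups row =>
      groups.modify ((PySem.Dict.ofList row).getD "canonical_sku" "") [] (· ++ [row])) PySem.Dict.empty
  groups.values.map (fun group =>
    match group with
    | [] => []   -- unreachable: every stored group is nonempty
    | first :: rest =>
        (rest.foldl (fun current row =>
          (PySem.Dict.ofList row).items.foldl (fun current kv =>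
            if kv.2 != "" && current.getD kv.1 "" == "" then current.insert kv.1 kv.2 else current) current)
          (PySem.Dict.ofList first)).items)

-- ===== PRECONDITION & SPEC =====
-- Pre_ excludes exactly the inputs where some row lacks the key "canonical_sku": there A raises KeyError.
def Pre_merge_product_catalog_rows_py (rows : List (List (String × String))) : Prop :=
  ∀ row ∈ rows, "canonical_sku" ∈ row.map (·.1)
instance (rows : List (List (String × String))) : Decidable (Pre_merge_product_catalog_rows_py rows) := by unfold Pre_merge_product_catalog_rows_py; infer_instance
def pvWitness_merge_product_catalog_rows_py : (List (List (String × String))) :=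
  [[("canonical_sku", "a"), ("color", "")], [("canonical_sku", "a"), ("color", "red")]]

def Spec_merge_product_catalog_rows_py (rows : List (List (String × String))) (out : List (List (String × String))) : Prop := out = merge_product_catalog_rows_py_alt rows
instance (rows : List (List (String × String))) (out : List (List (String × String))) : Decidable (Spec_merge_product_catalog_rows_py rows out) := by unfold Spec_merge_product_catalog_rows_py; infer_instance

-- ===== CLAIM (what is proved, stated in full; the proofs are below) =====
def Claim_equal_merge_product_catalog_rows_py : Prop := ∀ (rows : List (List (String × String))), Dom_merge_product_catalog_rows_py rows → Pre_merge_product_catalog_rows_py rows → Spec_merge_product_catalog_rows_py rows (merge_product_catalog_rows_py rows)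

-- ===== LEMMAS AND PROOFS =====

-- the shared fill rule: `if value and not current.get(key): current[key] = value`
def pvFill (current : PySem.Dict String String) (row : List (String × String)) : PySem.Dict String String :=
  (PySem.Dict.ofList row).items.foldl (fun current kv =>
    if kv.2 != "" && current.getD kv.1 "" == "" then current.insert kv.1 kv.2 else current) current

-- reduce one group to its merged record
def pvReduce (grp : List (List (String × String))) : PySem.Dict String String :=
  match grp with
  | [] => PySem.Dict.empty
  | first :: rest => rest.foldl pvFill (PySem.Dict.ofList first)

def pvKey (row : List (String × String)) : String := (PySem.Dict.ofList row).getD "canonical_sku" ""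

def pvStepA (m : PySem.Dict String (PySem.Dict String String)) (row : List (String × String)) : PySem.Dict String (PySem.Dict String String) :=
  match m.get? (pvKey row) with
  | none => m.insert (pvKey row) (PySem.Dict.ofList row)
  | some current => m.insert (pvKey row) (pvFill current row)

def pvStepB (g : PySem.Dict String (List (List (String × String)))) (row : List (String × String)) : PySem.Dict String (List (List (String × String))) :=
  g.modify (pvKey row) [] (· ++ [row])

def pvR (m : PySem.Dict String (PySem.Dict String String)) (g : PySem.Dict String (List (List (String × String)))) : Prop :=
  m.keys = g.keys ∧ g.keys.Nodup ∧ (∀ k, k ∈ g.keys → g.getD k [] ≠ []) ∧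
    (∀ k, m.getD k PySem.Dict.empty = pvReduce (g.getD k []))

lemma pvReduce_append (grp : List (List (String × String))) (row : List (String × String)) :
    pvReduce (grp ++ [row]) = match grp with
      | [] => PySem.Dict.ofList row
      | _ :: _ => pvFill (pvReduce grp) row := by
  cases grp with
  | nil => simp [pvReduce]
  | cons r rest => simp [pvReduce, List.foldl_append]

lemma pvStep_preserves (m : PySem.Dict String (PySem.Dict String String))
    (g : PySem.Dict String (List (List (String × String)))) (row : List (String × String))
    (h : pvR m g) : pvR (pvStepA m row) (pvStepB g row) := by
  obtain ⟨hkeys, hnd, hne, hval⟩ := h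
  by_cases hc : pvKey row ∈ g.keys
  · -- the sku is already present: both sides keep their keys
    have hgc : g.contains (pvKey row) = true := (PySem.Dict.contains_iff_mem_keys _ _).2 hc
    have hmc : m.contains (pvKey row) = true :=
      (PySem.Dict.contains_iff_mem_keys _ _).2 (hkeys ▸ hc)
    obtain ⟨cur, hcur⟩ : ∃ cur, m.get? (pvKey row) = some cur := by
      cases hg : m.get? (pvKey row) with
      | none => exact absurd ((PySem.Dict.get?_eq_none_iff_not_mem_keys _ _).1 hg) (by simp [hkeys ▸ hc])
      | some cur => exact ⟨cur, rfl⟩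
    have hcurv : cur = pvReduce (g.getD (pvKey row) []) := by
      rw [← hval (pvKey row)]; exact (PySem.Dict.getD_of_get?_eq_some _ _ hcur).symm
    have hgrp : g.getD (pvKey row) [] ≠ [] := hne _ hc
    unfold pvStepA pvStepB
    rw [hcur]
    refine ⟨?_, ?_, ?_, ?_⟩
    · rw [PySem.Dict.keys_insert_of_contains _ _ hmc, PySem.Dict.keys_modify,
        PySem.Dict.keys_insert_of_contains _ _ hgc]
      exact hkeys
    · rw [PySem.Dict.keys_modify, PySem.Dict.keys_insert_of_contains _ _ hgc]; exact hnd
    · intro k hk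
      rw [PySem.Dict.keys_modify, PySem.Dict.keys_insert_of_contains _ _ hgc] at hk
      rw [PySem.Dict.getD_modify]
      by_cases hkk : k = pvKey row
      · simp [hkk]
      · simp only [if_neg hkk]; exact hne k hk
    · intro k
      rw [PySem.Dict.getD_insert, PySem.Dict.getD_modify]
      by_cases hkk : k = pvKey row
      · subst hkk
        simp only [if_true]
        rw [pvReduce_append]
        cases hg : g.getD (pvKey row) [] with
        | nil => exact absurd hg hgrp
        | cons r rest =>
          rw [hcurv, hg]
      · simp only [if_neg hkk]; exact hval k
  · -- first row with this sku: both sides append the key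
    have hgc : g.contains (pvKey row) = false := by
      cases hg : g.contains (pvKey row)
      · rfl
      · exact absurd ((PySem.Dict.contains_iff_mem_keys _ _).1 hg) hc
    have hmc : m.contains (pvKey row) = false := by
      cases hg : m.contains (pvKey row)
      · rfl
      · exact absurd (hkeys ▸ (PySem.Dict.contains_iff_mem_keys _ _).1 hg) hc
    have hmn : m.get? (pvKey row) = none :=
      (PySem.Dict.get?_eq_none_iff_not_mem_keys _ _).2 (by rw [hkeys]; exact hc)
    have hg0 : g.getD (pvKey row) [] = [] := PySem.Dict.getD_of_not_contains _ _ hgc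
    unfold pvStepA pvStepB
    rw [hmn]
    refine ⟨?_, ?_, ?_, ?_⟩
    · rw [PySem.Dict.keys_insert_of_not_contains _ _ hmc, PySem.Dict.keys_modify,
        PySem.Dict.keys_insert_of_not_contains _ _ hgc, hkeys]
    · rw [PySem.Dict.keys_modify, PySem.Dict.keys_insert_of_not_contains _ _ hgc]
      exact List.Nodup.append hnd (List.nodup_singleton _) (by simpa using hc)
    · intro k hk
      rw [PySem.Dict.keys_modify, PySem.Dict.keys_insert_of_not_contains _ _ hgc] at hk
      rw [PySem.Dict.getD_modify]
      by_cases hkk : k = pvKey row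
      · simp [hkk]
      · simp only [if_neg hkk]
        refine hne k ?_
        rcases List.mem_append.1 hk with h | h
        · exact h
        · exact absurd (List.mem_singleton.1 h) hkk
    · intro k
      rw [PySem.Dict.getD_insert, PySem.Dict.getD_modify]
      by_cases hkk : k = pvKey row
      · subst hkk
        simp only [hg0]
        simp [pvReduce]
      · simp only [if_neg hkk]; exact hval k

lemma pvLoop (rows : List (List (String × String)))
    (m : PySem.Dict String (PySem.Dict String String))
    (g : PySem.Dict String (List (List (String × String))))
    (h : pvR m g) : pvR (rows.foldl pvStepA m) (rows.foldl pvStepB g) := by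
  induction rows generalizing m g with
  | nil => exact h
  | cons r rs ih => exact ih _ _ (pvStep_preserves m g r h)

-- ===== VERDICT (by name: the statement is the Claim_ definition above) =====
theorem merge_product_catalog_rows_py_spec : Claim_equal_merge_product_catalog_rows_py := by
  intro rows _ _
  unfold Spec_merge_product_catalog_rows_py
  have hA : merge_product_catalog_rows_py rows
      = (rows.foldl pvStepA PySem.Dict.empty).values.map (fun d => d.items) := rfl
  have hB : merge_product_catalog_rows_py_alt rows
      = (rows.foldl pvStepB PySem.Dict.empty).values.map (fun group =>
          match group with
          | [] => []
          | first :: rest => (rest.foldl pvFill (PySem.Dict.ofList first)).items) := rfl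
  rw [hA, hB]
  obtain ⟨hkeys, hnd, hne, hval⟩ := pvLoop rows PySem.Dict.empty PySem.Dict.empty
    ⟨rfl, by simp [PySem.Dict.keys_empty], by simp [PySem.Dict.keys_empty], by
      intro k; simp [PySem.Dict.getD_empty, pvReduce]⟩
  rw [PySem.Dict.values_eq_map_keys _ (hkeys ▸ hnd) PySem.Dict.empty,
    PySem.Dict.values_eq_map_keys _ hnd [], hkeys, List.map_map, List.map_map]
  refine List.map_congr_left ?_
  intro k hk
  simp only [Function.comp]
  rw [hval k]
  cases hg : (rows.foldl pvStepB PySem.Dict.empty).getD k [] with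
  | nil => exact absurd hg (hne k hk)
  | cons r rest => rfl
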